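-- pv_equiv track=rewrite | github.com/martinrenner/code-quality-quiz | ascii_art/question 7/#4.py | draw_circle
-- ===== SOURCE A (Python) =====
-- def draw_circle(diameter: int, symbol: str) -> str:
--     """
--     Draws an approximate circle using the specified symbol.
--
--     :param diameter: The diameter of the circle.
--     :param symbol: The symbol to use for drawing the circle.
--     :return: The ASCII art representation of the circle.
--     :raises ValueError: If the diameter is less than 1 or the symbol is not a single character.
--     """
--     if diameter < 1:
--         raise ValueError("Diameter must be greater than or equal to 1.")
--     if len(symbol) != 1:
--         raise ValueError("Symbol must be a single character.")
--
--     output = []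
--     radius = diameter // 2
--     for y in range(-radius, radius + 1):
--         row = []
--         for x in range(-radius, radius + 1):
--             if x * x + y * y <= radius * radius:
--                 row.append(symbol)
--             else:
--                 row.append(' ')
--         output.append(''.join(row))
--     return '\n'.join(output)
-- ===== SOURCE B (Python) =====
-- def draw_circle(diameter: int, symbol: str) -> str:
--     if diameter < 1:
--         raise ValueError("Diameter must be greater than or equal to 1.")
--     if len(symbol) != 1:
--         raise ValueError("Symbol must be a single character.")
--
--     radius = diameter // 2
--     half = []
--     h = radius  # running half-width; only ever shrinks as y grows
--     for y in range(0, radius + 1):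
--         while h * h + y * y > radius * radius:
--             h -= 1
--         pad = ' ' * (radius - h)
--         half.append(pad + symbol * (2 * h + 1) + pad)
--     return '\n'.join(list(reversed(half[1:])) + half)
-- ===== Notes on version B (the rewrite author's own statement) =====
-- stated objective: alternative
-- what changed: Replaced the per-cell x-loop membership test by a closed-form row construction: a running half-width h (shrunk by a while loop, O(r) total) gives each row as pad + symbol*(2h+1) + pad, and only the upper half is computed, the lower half being its mirror.
import Mathlib
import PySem

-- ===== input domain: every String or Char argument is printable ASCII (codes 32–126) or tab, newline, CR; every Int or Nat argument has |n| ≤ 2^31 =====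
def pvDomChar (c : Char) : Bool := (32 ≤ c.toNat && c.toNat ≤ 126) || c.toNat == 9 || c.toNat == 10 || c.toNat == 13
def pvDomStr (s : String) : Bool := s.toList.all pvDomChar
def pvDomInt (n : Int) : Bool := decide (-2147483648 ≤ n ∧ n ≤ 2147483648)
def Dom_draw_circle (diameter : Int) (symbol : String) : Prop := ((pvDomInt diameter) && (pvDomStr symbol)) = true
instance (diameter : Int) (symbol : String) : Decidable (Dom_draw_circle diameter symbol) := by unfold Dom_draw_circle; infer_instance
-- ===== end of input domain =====

-- B replaces the per-cell x-loop test by rows built from a running half-width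
-- (shrunk by a while loop) and mirrors the upper half; return values proved equal.

-- ===== PORT A =====
-- literal transliteration of A's nested loops (the two ValueError guards are handled by Pre_ below)
def draw_circle (diameter : Int) (symbol : String) : String :=
  let radius := PySem.Int.floordiv diameter 2
  let output := (PySem.List.pyRange (-radius) (radius + 1) 1).map (fun y =>
    PySem.Str.join "" ((PySem.List.pyRange (-radius) (radius + 1) 1).map (fun x =>
      if x * x + y * y ≤ radius * radius then symbol else " ")))
  PySem.Str.join "\n" output

-- ===== PORT B =====
-- the 'while h*h+y*y > r*r: h -= 1' loop of Source B; the 0 < h conjunct is only a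
-- termination guard (inside Pre_ the Python loop never passes 0 either)
def pvShrink (r y h : Int) : Int :=
  if 0 < h ∧ r * r < h * h + y * y then pvShrink r y (h - 1) else h
termination_by h.toNat
decreasing_by omega

-- pad + symbol*(2h+1) + pad, exactly Source B's concatenation of three repeated pieces
def pvRow (r h : Int) (symbol : String) : String :=
  String.ofList (PySem.List.pyRepeat [' '] (r - h) ++
                 PySem.List.pyRepeat symbol.toList (2 * h + 1) ++
                 PySem.List.pyRepeat [' '] (r - h))

-- one iteration of Source B's for-loop body (state = (h, half))
def pvStep (r : Int) (symbol : String) (st : Int × List String) (y : Int) : Int × List String :=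
  let h := pvShrink r y st.1
  (h, st.2 ++ [pvRow r h symbol])

def draw_circle_alt (diameter : Int) (symbol : String) : String :=
  let radius := PySem.Int.floordiv diameter 2
  let st := (PySem.List.pyRange 0 (radius + 1) 1).foldl (pvStep radius symbol) (radius, [])
  let half := st.2
  PySem.Str.join "\n" ((PySem.List.slice half (some 1) none).reverse ++ half)

-- ===== PRECONDITION & SPEC =====
-- Pre_ excludes exactly the inputs on which A raises ValueError (diameter < 1 or
-- a symbol that is not a single character); B raises identically there.
def Pre_draw_circle (diameter : Int) (symbol : String) : Prop :=
  1 ≤ diameter ∧ symbol.toList.length = 1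

instance (diameter : Int) (symbol : String) : Decidable (Pre_draw_circle diameter symbol) := by
  unfold Pre_draw_circle; infer_instance

def pvWitness_draw_circle : Int × String := (5, "*")

def Spec_draw_circle (diameter : Int) (symbol : String) (out : String) : Prop :=
  out = draw_circle_alt diameter symbol
instance (diameter : Int) (symbol : String) (out : String) : Decidable (Spec_draw_circle diameter symbol out) := by unfold Spec_draw_circle; infer_instance

-- ===== CLAIM (what is proved, stated in full; the proofs are below) =====
def Claim_equal_draw_circle : Prop := ∀ (diameter : Int) (symbol : String), Dom_draw_circle diameter symbol → Pre_draw_circle diameter symbol → Spec_draw_circle diameter symbol (draw_circle diameter symbol)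

-- ===== LEMMAS AND PROOFS =====

-- the half-width of the row at height y: ⌊√(r² − y²)⌋
def pvH (r y : Int) : Int := (Nat.sqrt (r * r - y * y).toNat : Int)

theorem pvH_spec (r y : Int) (hy0 : 0 ≤ y) (hyr : y ≤ r) :
    0 ≤ pvH r y ∧ pvH r y ≤ r ∧ pvH r y * pvH r y + y * y ≤ r * r ∧
      r * r < (pvH r y + 1) * (pvH r y + 1) + y * y := by
  have hyy : y * y ≤ r * r := by nlinarith
  have hcast : ((r * r - y * y).toNat : Int) = r * r - y * y := Int.toNat_of_nonneg (by omega)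
  have h1 : (Nat.sqrt (r * r - y * y).toNat * Nat.sqrt (r * r - y * y).toNat : Int)
      ≤ ((r * r - y * y).toNat : Int) := by
    exact_mod_cast (by nlinarith [Nat.sqrt_le' (r * r - y * y).toNat] :
      Nat.sqrt (r * r - y * y).toNat * Nat.sqrt (r * r - y * y).toNat ≤ (r * r - y * y).toNat)
  have h2 : ((r * r - y * y).toNat : Int)
      < (Nat.sqrt (r * r - y * y).toNat + 1) * (Nat.sqrt (r * r - y * y).toNat + 1) := by
    exact_mod_cast (by nlinarith [Nat.lt_succ_sqrt' (r * r - y * y).toNat] :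
      (r * r - y * y).toNat < (Nat.sqrt (r * r - y * y).toNat + 1) * (Nat.sqrt (r * r - y * y).toNat + 1))
  have h0 : (0 : Int) ≤ pvH r y := by unfold pvH; exact Int.natCast_nonneg _
  refine ⟨h0, ?_, ?_, ?_⟩
  · unfold pvH at h0 ⊢; nlinarith [h1, hcast, mul_self_nonneg y]
  · unfold pvH; linarith [h1, hcast]
  · unfold pvH; linarith [h2, hcast]

theorem pvH_mono (r y : Int) (hy : 0 ≤ y) : pvH r (y + 1) ≤ pvH r y := by
  unfold pvH
  have : (r * r - (y + 1) * (y + 1)).toNat ≤ (r * r - y * y).toNat := by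
    apply Int.toNat_le_toNat; nlinarith
  exact_mod_cast Nat.sqrt_le_sqrt this

theorem pvShrink_eq (r y t : Int) (ht0 : 0 ≤ t) (hle : t * t + y * y ≤ r * r)
    (hgt : r * r < (t + 1) * (t + 1) + y * y) :
    ∀ h, t ≤ h → pvShrink r y h = t := by
  have main : ∀ n : Nat, ∀ h : Int, t ≤ h → (h - t).toNat = n → pvShrink r y h = t := by
    intro n
    induction n with
    | zero =>
      intro h hth hn
      have : h = t := by omega
      subst this
      rw [pvShrink, if_neg]
      exact fun hcon => absurd hcon.2 (not_lt.mpr hle)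
    | succ n ih =>
      intro h hth hn
      have hgt' : t + 1 ≤ h := by omega
      have hcond : r * r < h * h + y * y := by nlinarith
      rw [pvShrink, if_pos ⟨by omega, hcond⟩]
      exact ih (h - 1) (by omega) (by omega)
  intro h hth
  exact main (h - t).toNat h hth rfl

-- row y of A's picture, as the port writes it
def pvRowA (r y : Int) (symbol : String) : String :=
  PySem.Str.join "" ((PySem.List.pyRange (-r) (r + 1) 1).map (fun x =>
    if x * x + y * y ≤ r * r then symbol else " "))

def pvCharf (r y : Int) (c : Char) (x : Int) : Char :=
  if x * x + y * y ≤ r * r then c else ' '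

theorem pvRowA_neg (r y : Int) (symbol : String) : pvRowA r (-y) symbol = pvRowA r y symbol := by
  simp [pvRowA]

theorem pvRow_chars (r y : Int) (c : Char) (hy0 : 0 ≤ y) (hyr : y ≤ r) :
    (PySem.List.pyRange (-r) (r + 1) 1).map (pvCharf r y c)
      = List.replicate (r - pvH r y).toNat ' ' ++ List.replicate (2 * pvH r y + 1).toNat c ++
        List.replicate (r - pvH r y).toNat ' ' := by
  obtain ⟨h0, hhr, hle, hgt⟩ := pvH_spec r y hy0 hyr
  set h := pvH r y with hh
  rw [PySem.List.pyRange_one_append (-r) (-h) (r + 1) (by omega) (by omega),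
      PySem.List.pyRange_one_append (-h) (h + 1) (r + 1) (by omega) (by omega),
      List.map_append, List.map_append, List.append_assoc]
  congr 1
  · rw [List.eq_replicate_iff]
    constructor
    · rw [List.length_map, PySem.List.length_pyRange_one]; omega
    · intro b hb
      simp only [List.mem_map, PySem.List.mem_pyRange_one] at hb
      obtain ⟨x, ⟨hx1, hx2⟩, rfl⟩ := hb
      have : r * r < x * x + y * y := by nlinarith
      simp [pvCharf]; omega
  congr 1
  · rw [List.eq_replicate_iff]
    constructor
    · rw [List.length_map, PySem.List.length_pyRange_one]; omega
    · intro b hb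
      simp only [List.mem_map, PySem.List.mem_pyRange_one] at hb
      obtain ⟨x, ⟨hx1, hx2⟩, rfl⟩ := hb
      have hx : x * x ≤ h * h := by nlinarith [(h - x) * (h + x)]
      simp [pvCharf]; omega
  · rw [List.eq_replicate_iff]
    constructor
    · rw [List.length_map, PySem.List.length_pyRange_one]; omega
    · intro b hb
      simp only [List.mem_map, PySem.List.mem_pyRange_one] at hb
      obtain ⟨x, ⟨hx1, hx2⟩, rfl⟩ := hb
      have : r * r < x * x + y * y := by nlinarith
      simp [pvCharf]; omega

theorem pvRowA_eq (r y : Int) (symbol : String) (c : Char) (hc : symbol.toList = [c])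
    (hy0 : 0 ≤ y) (hyr : y ≤ r) :
    pvRowA r y symbol = pvRow r (pvH r y) symbol := by
  apply String.toList_inj.mp
  have hmap : ((PySem.List.pyRange (-r) (r + 1) 1).map (fun x =>
        if x * x + y * y ≤ r * r then symbol else " ")).map String.toList
      = ((PySem.List.pyRange (-r) (r + 1) 1).map (pvCharf r y c)).map (fun a => [a]) := by
    rw [List.map_map, List.map_map]
    apply List.map_congr_left
    intro x _
    simp only [Function.comp, pvCharf, apply_ite String.toList, hc,
      apply_ite (fun a : Char => [a])]
    rfl
  simp only [pvRowA, PySem.Str.join, hmap]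
  rw [show ("" : String).toList = [] from rfl, PySem.Chars.join_nil_singletons,
    pvRow_chars r y c hy0 hyr]
  simp [pvRow, hc, PySem.List.pyRepeat_singleton]

theorem pvFold_inv (r : Int) (symbol : String) (hr : 0 ≤ r) : ∀ k : Nat, (k : Int) ≤ r →
    (PySem.List.pyRange 0 ((k : Int) + 1) 1).foldl (pvStep r symbol) (r, [])
      = (pvH r k, (PySem.List.pyRange 0 ((k : Int) + 1) 1).map (fun y => pvRow r (pvH r y) symbol)) := by
  intro k
  induction k with
  | zero =>
    intro _
    have h1 : ((0 : Nat) : Int) + 1 = (0 : Int) + 1 := by norm_num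
    rw [h1, PySem.List.pyRange_one_singleton]
    obtain ⟨h0, hhr, hle, hgt⟩ := pvH_spec r 0 le_rfl hr
    simp only [List.foldl, List.map, pvStep]
    rw [pvShrink_eq r 0 (pvH r 0) h0 hle hgt r hhr]
    norm_num
  | succ k ih =>
    intro hk1
    have hk : (k : Int) ≤ r := by push_cast at hk1 ⊢; omega
    have hcast : ((k + 1 : Nat) : Int) = (k : Int) + 1 := by push_cast; ring
    rw [hcast, PySem.List.pyRange_one_succ_right (by omega : (0 : Int) ≤ (k : Int) + 1),
        List.foldl_append, ih hk, List.map_append]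
    obtain ⟨h0, hhr, hle, hgt⟩ := pvH_spec r ((k : Int) + 1) (by omega) (by push_cast at hk1; omega)
    have hmono : pvH r ((k : Int) + 1) ≤ pvH r k := pvH_mono r k (by positivity)
    simp only [List.foldl, List.map, pvStep]
    rw [pvShrink_eq r ((k : Int) + 1) (pvH r ((k : Int) + 1)) h0 hle hgt (pvH r k) hmono]

theorem pvListA_eq (r : Int) (symbol : String) (c : Char) (hr : 0 ≤ r) (hc : symbol.toList = [c]) :
    (PySem.List.pyRange (-r) (r + 1) 1).map (fun y => pvRowA r y symbol)
      = ((PySem.List.pyRange 1 (r + 1) 1).map (fun y => pvRow r (pvH r y) symbol)).reverse ++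
        (PySem.List.pyRange 0 (r + 1) 1).map (fun y => pvRow r (pvH r y) symbol) := by
  rw [PySem.List.pyRange_one_append (-r) 0 (r + 1) (by omega) (by omega), List.map_append]
  congr 1
  · have hrev : ((PySem.List.pyRange 1 (r + 1) 1).map (fun y => pvRow r (pvH r y) symbol)).reverse
        = ((PySem.List.pyRange 1 (r + 1) 1).reverse).map (fun y => pvRow r (pvH r y) symbol) := by
      rw [List.map_reverse]
    rw [hrev]
    have h2 : (PySem.List.pyRange 1 (r + 1) 1).reverse = PySem.List.pyRange r 0 (-1) := by
      rw [PySem.List.pyRange_neg_one_eq_reverse]; norm_num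
    rw [h2, PySem.List.pyRange_neg_one, PySem.List.pyRange_one, List.map_map, List.map_map]
    have h3 : (0 - -r).toNat = (r - 0).toNat := by omega
    rw [h3]
    apply List.map_congr_left
    intro k hk
    simp only [List.mem_range] at hk
    have hkr : (k : Int) < r := by omega
    have hy : (-r + (k : Int)) = -(r - k) := by ring
    simp only [Function.comp]
    rw [hy, pvRowA_neg, pvRowA_eq r (r - k) symbol c hc (by omega) (by omega)]
  · apply List.map_congr_left
    intro y hy
    rw [PySem.List.mem_pyRange_one] at hy
    exact pvRowA_eq r y symbol c hc hy.1 (by omega)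

-- ===== VERDICT (by name: the statement is the Claim_ definition above) =====
theorem draw_circle_spec : Claim_equal_draw_circle := by
  intro d symbol _dom hpre
  obtain ⟨hd, hlen⟩ := hpre
  obtain ⟨c, hc⟩ := List.length_eq_one_iff.mp hlen
  unfold Spec_draw_circle draw_circle draw_circle_alt
  dsimp only
  set r := PySem.Int.floordiv d 2 with hrdef
  have hr : 0 ≤ r := (PySem.Int.le_floordiv_iff_mul_le (by norm_num)).mpr (by omega)
  have hrk : ((r.toNat : Int)) = r := Int.toNat_of_nonneg hr
  have hfold := pvFold_inv r symbol hr r.toNat (by omega)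
  rw [hrk] at hfold
  rw [hfold]
  have hhalf1 : (PySem.List.slice ((PySem.List.pyRange 0 (r + 1) 1).map (fun y => pvRow r (pvH r y) symbol)) (some 1) none)
      = ((PySem.List.pyRange 0 (r + 1) 1).map (fun y => pvRow r (pvH r y) symbol)).drop 1 := by
    rw [PySem.List.slice_from _ (by norm_num)]
    norm_num
  have hcons : PySem.List.pyRange 0 (r + 1) 1 = 0 :: PySem.List.pyRange (0 + 1) (r + 1) 1 :=
    PySem.List.pyRange_one_cons (by omega)
  have hdrop : ((PySem.List.pyRange 0 (r + 1) 1).map (fun y => pvRow r (pvH r y) symbol)).drop 1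
      = (PySem.List.pyRange 1 (r + 1) 1).map (fun y => pvRow r (pvH r y) symbol) := by
    rw [hcons]; norm_num
  rw [hhalf1, hdrop]
  have hA : (fun y => PySem.Str.join "" ((PySem.List.pyRange (-r) (r + 1) 1).map (fun x =>
      if x * x + y * y ≤ r * r then symbol else " "))) = fun y => pvRowA r y symbol := rfl
  rw [hA, pvListA_eq r symbol c hr hc]
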